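-- pv_equiv track=rewrite | github.com/ProfessorRex/numbergame | app/src/main/python/numgame.py | is_undulating
-- ===== SOURCE A (Python) =====
-- def get_digits(num):
--     digits = []
--     string = str(num)
--     for digit in string:
--         digits.append(int(digit))
--     return digits
--
-- def is_undulating(num):
--     '''in form ABAB, A can = B'''
--     if num < 10:
--         return True
--     digits = get_digits(num)
--     digit1 = digits[0]
--     digit2 = digits[1]
--     wanted = digit1
--     for digit in digits[2:]:
--         if digit != wanted:
--             return False
--         else:
--             if wanted == digit1:
--                 wanted = digit2
--             else:
--                 wanted = digit1
--     return True
-- ===== SOURCE B (Python) =====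
-- def is_undulating(num):
--     '''in form ABAB, A can = B'''
--     if num < 10:
--         return True
--     s = str(num)
--     pat = (s[:2] * len(s))[:len(s)]
--     return s == pat
-- ===== Notes on version B (the rewrite author's own statement) =====
-- stated objective: simpler
-- what changed: Instead of converting each character to an int and walking the digit list with a toggling 'wanted' accumulator and early returns, B builds the expected ABAB pattern once by repeating the first two characters of str(num) and compares the whole string at once.
import Mathlib
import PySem

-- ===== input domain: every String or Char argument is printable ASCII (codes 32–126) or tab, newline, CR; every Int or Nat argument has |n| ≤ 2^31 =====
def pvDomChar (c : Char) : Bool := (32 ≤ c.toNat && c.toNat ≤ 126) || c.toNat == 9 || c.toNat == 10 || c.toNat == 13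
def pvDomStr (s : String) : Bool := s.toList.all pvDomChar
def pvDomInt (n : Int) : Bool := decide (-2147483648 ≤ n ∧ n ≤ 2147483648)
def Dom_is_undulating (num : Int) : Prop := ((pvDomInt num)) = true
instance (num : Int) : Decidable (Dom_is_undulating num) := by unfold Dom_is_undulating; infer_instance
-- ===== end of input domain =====

-- B builds the expected ABAB pattern by repeating the first two characters of str(num)
-- and compares the whole string at once, instead of A's digit walk with a toggling accumulator.

-- ===== PORT A =====
-- get_digits: digits = []; for digit in str(num): digits.append(int(digit)).
-- int(digit) is PySem.Int.ofStr?; the .getD 0 fallback is unreachable where A calls it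
-- (num ≥ 10, so str(num) consists of digit characters only).
def pvGetDigits (num : Int) : List Int :=
  (PySem.Int.toStr num).toList.foldl
    (fun digits digit => digits ++ [(PySem.Int.ofStr? (String.ofList [digit])).getD 0]) []

-- the for-loop over digits[2:] with early return False and the toggling 'wanted' state
def pvUndLoop (digit1 digit2 : Int) : Int → List Int → Bool
  | _, [] => true
  | wanted, d :: rest =>
    if d ≠ wanted then false
    else pvUndLoop digit1 digit2 (if wanted = digit1 then digit2 else digit1) rest

def is_undulating (num : Int) : Bool :=
  if num < 10 then true
  else
    let digits := pvGetDigits num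
    -- digits[0] / digits[1]: IndexError impossible here (num ≥ 10 gives ≥ 2 digits)
    let digit1 := (PySem.List.pyGet? digits 0).getD 0
    let digit2 := (PySem.List.pyGet? digits 1).getD 0
    pvUndLoop digit1 digit2 digit1 (PySem.List.slice digits (some 2) none)

-- ===== PORT B =====
-- s == (s[:2] * len(s))[:len(s)]; string slicing/repetition/comparison ported on the
-- code-point list of str(num) (exact: Str ops are the List ops on toList).
def is_undulating_alt (num : Int) : Bool :=
  if num < 10 then true
  else
    let l := (PySem.Int.toStr num).toList
    let pat := PySem.List.slice
      (PySem.List.pyRepeat (PySem.List.slice l none (some 2)) (l.length : Int))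
      none (some (l.length : Int))
    decide (l = pat)

-- ===== PRECONDITION & SPEC =====
def Spec_is_undulating (num : Int) (out : Bool) : Prop := out = is_undulating_alt num
instance (num : Int) (out : Bool) : Decidable (Spec_is_undulating num out) := by unfold Spec_is_undulating; infer_instance

-- ===== CLAIM (what is proved, stated in full; the proofs are below) =====
def Claim_equal_is_undulating : Prop := ∀ (num : Int), Dom_is_undulating num → Spec_is_undulating num (is_undulating num)

-- ===== LEMMAS AND PROOFS =====

-- the alternating pattern a b a b … of length n
def pvAltList : Nat → Char → Char → List Char
  | 0, _, _ => []
  | n + 1, a, b => a :: pvAltList n b a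

-- int(str(c)) as A computes it per character
def pvG (c : Char) : Int := (PySem.Int.ofStr? (String.ofList [c])).getD 0

theorem pvG_ofNat (k : Nat) (h1 : 48 ≤ k) (h2 : k ≤ 57) :
    pvG (Char.ofNat k) = (k : Int) - 48 := by
  unfold pvG; interval_cases k <;> decide

theorem pv_digit_bounds (c : Char) (h : c.isDigit = true) : 48 ≤ c.toNat ∧ c.toNat ≤ 57 := by
  simp [Char.isDigit] at h
  exact ⟨h.1, h.2⟩

theorem pvG_digit (c : Char) (h : c.isDigit = true) : pvG c = (c.toNat : Int) - 48 := by
  obtain ⟨h1, h2⟩ := pv_digit_bounds c h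
  have := pvG_ofNat c.toNat h1 h2
  rwa [Char.ofNat_toNat] at this

theorem pvG_inj (c d : Char) (hc : c.isDigit = true) (hd : d.isDigit = true)
    (h : pvG c = pvG d) : c = d := by
  rw [pvG_digit c hc, pvG_digit d hd] at h
  have : c.toNat = d.toNat := by omega
  have := congrArg Char.ofNat this
  rwa [Char.ofNat_toNat, Char.ofNat_toNat] at this

theorem pv_loop_altern (a b : Char) (ha : a.isDigit = true) (hb : b.isDigit = true) :
    ∀ t : List Char, (∀ c ∈ t, c.isDigit = true) →
      (pvUndLoop (pvG a) (pvG b) (pvG a) (t.map pvG) = decide (t = pvAltList t.length a b) ∧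
       pvUndLoop (pvG a) (pvG b) (pvG b) (t.map pvG) = decide (t = pvAltList t.length b a)) := by
  intro t
  induction t with
  | nil => intro _; constructor <;> simp [pvUndLoop, pvAltList]
  | cons c r ih =>
    intro hdig
    have hc : c.isDigit = true := hdig c (by simp)
    have hr : ∀ x ∈ r, x.isDigit = true := fun x hx => hdig x (by simp [hx])
    obtain ⟨ih1, ih2⟩ := ih hr
    constructor
    · -- wanted = digit1
      simp only [List.map_cons, pvUndLoop]
      by_cases h : pvG c = pvG a
      · have hca : c = a := pvG_inj c a hc ha h
        subst hca
        simp only [ne_eq, not_true_eq_false, if_false, if_true, ih2]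
        simp [pvAltList]
      · have hca : c ≠ a := fun e => h (e ▸ rfl)
        simp [h, pvAltList, hca]
    · -- wanted = digit2
      simp only [List.map_cons, pvUndLoop]
      by_cases h : pvG c = pvG b
      · have hcb : c = b := pvG_inj c b hc hb h
        subst hcb
        by_cases hba : pvG c = pvG a
        · have hab : c = a := pvG_inj c a hc ha hba
          simp only [ne_eq, not_true_eq_false, if_false, hba, if_true]
          subst hab
          rw [ih2]
          simp [pvAltList]
        · simp only [ne_eq, not_true_eq_false, if_false, if_neg hba, ih1]
          simp [pvAltList]
      · have hcb : c ≠ b := fun e => h (e ▸ rfl)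
        simp [h, pvAltList, hcb]

theorem pv_take_flatten (a b : Char) :
    ∀ (n m : Nat), m ≤ 2 * n →
      (List.replicate n [a, b]).flatten.take m = pvAltList m a b := by
  intro n
  induction n with
  | zero => intro m hm; interval_cases m; simp [pvAltList]
  | succ k ih =>
    intro m hm
    match m with
    | 0 => simp [pvAltList]
    | 1 => simp [List.replicate_succ, pvAltList]
    | m + 2 =>
      simp only [List.replicate_succ, List.flatten_cons, List.cons_append, List.nil_append,
        List.take_succ_cons, pvAltList]
      rw [ih m (by omega)]

-- membership in toDigitsCore: all digit characters (base 10)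
theorem pv_digitChar_isDigit (k : Nat) (h : k < 10) : (Nat.digitChar k).isDigit = true := by
  interval_cases k <;> decide

theorem pv_toDigitsCore_digits :
    ∀ (f n : Nat) (l : List Char), (∀ c ∈ l, c.isDigit = true) →
      ∀ c ∈ Nat.toDigitsCore 10 f n l, c.isDigit = true := by
  intro f
  induction f with
  | zero => intro n l hl; simpa [Nat.toDigitsCore] using hl
  | succ k ih =>
    intro n l hl c hc
    simp only [Nat.toDigitsCore] at hc
    have hd : ∀ x ∈ (n % 10).digitChar :: l, x.isDigit = true := by
      intro x hx
      rcases List.mem_cons.mp hx with h | h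
      · subst h; exact pv_digitChar_isDigit _ (Nat.mod_lt _ (by omega))
      · exact hl x h
    by_cases h10 : n / 10 = 0
    · rw [if_pos h10] at hc; exact hd c hc
    · rw [if_neg h10] at hc; exact ih (n / 10) _ hd c hc

theorem pv_toDigitsCore_len :
    ∀ (f n : Nat) (l : List Char), 1 ≤ f →
      l.length + 1 ≤ (Nat.toDigitsCore 10 f n l).length := by
  intro f
  induction f with
  | zero => intro n l h; omega
  | succ k ih =>
    intro n l _
    simp only [Nat.toDigitsCore]
    by_cases h10 : n / 10 = 0
    · simp [h10]
    · rw [if_neg h10]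
      cases k with
      | zero => simp [Nat.toDigitsCore]
      | succ j =>
        have h := ih (n / 10) ((n % 10).digitChar :: l) (by omega)
        simp only [List.length_cons] at h
        omega

theorem pv_toDigits_shape (n : Nat) (h : 10 ≤ n) :
    ∃ a b t, Nat.toDigits 10 n = a :: b :: t := by
  have hne : n / 10 ≠ 0 := by omega
  have hstep : Nat.toDigits 10 n = Nat.toDigitsCore 10 n (n / 10) [(n % 10).digitChar] := by
    unfold Nat.toDigits
    conv_lhs => rw [Nat.toDigitsCore]
    rw [if_neg hne]
  have hlen : 2 ≤ (Nat.toDigits 10 n).length := by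
    rw [hstep]
    have := pv_toDigitsCore_len n (n / 10) [(n % 10).digitChar] (by omega)
    simpa using this
  rcases e : Nat.toDigits 10 n with _ | ⟨a, _ | ⟨b, t⟩⟩ <;> rw [e] at hlen
  · simp at hlen
  · simp at hlen
  · exact ⟨a, b, t, rfl⟩

theorem pv_toDigits_digits (n : Nat) : ∀ c ∈ Nat.toDigits 10 n, c.isDigit = true :=
  pv_toDigitsCore_digits (n + 1) n [] (by simp)

theorem pv_foldl_append (l : List Char) :
    ∀ acc : List Int,
      l.foldl (fun digits digit => digits ++ [(PySem.Int.ofStr? (String.ofList [digit])).getD 0]) acc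
        = acc ++ l.map pvG := by
  induction l with
  | nil => intro acc; simp
  | cons c r ih =>
    intro acc
    rw [List.foldl_cons, ih]
    simp [pvG]

theorem is_undulating_spec' : ∀ (num : Int), is_undulating num = is_undulating_alt num := by
  intro num
  by_cases hlt : num < 10
  · simp [is_undulating, is_undulating_alt, hlt]
  · have h0 : ¬ num < 0 := by omega
    have h10 : 10 ≤ num.toNat := by omega
    have hchars : (PySem.Int.toStr num).toList = Nat.toDigits 10 num.toNat := by
      rw [PySem.Int.toList_toStr]
      simp [PySem.Int.toChars, h0]
    obtain ⟨a, b, t, hshape⟩ := pv_toDigits_shape num.toNat h10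
    have hall : ∀ c ∈ (PySem.Int.toStr num).toList, c.isDigit = true := by
      rw [hchars]; exact pv_toDigits_digits num.toNat
    rw [hchars] at hall
    rw [hshape] at hall hchars
    have ha : a.isDigit = true := hall a (by simp)
    have hb : b.isDigit = true := hall b (by simp)
    have ht : ∀ c ∈ t, c.isDigit = true := fun c hc => hall c (by simp [hc])
    -- A side
    have hdig : pvGetDigits num = pvG a :: pvG b :: t.map pvG := by
      unfold pvGetDigits
      rw [hchars, pv_foldl_append]
      simp
    have hA : is_undulating num
        = pvUndLoop (pvG a) (pvG b) (pvG a) (t.map pvG) := by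
      simp only [is_undulating, if_neg hlt, hdig]
      have hs2 : PySem.List.slice (pvG a :: pvG b :: t.map pvG) (some 2) none
          = t.map pvG := by
        rw [PySem.List.slice_from _ (by omega)]
        rfl
      simp [PySem.List.pyGet?, PySem.List.pyIdx?, hs2, show (0:Int) ≤ (t.length:Int) + 1 by positivity]
    -- B side
    have hrep : PySem.List.slice (a :: b :: t) none (some 2) = [a, b] := by
      rw [PySem.List.slice_to _ (by omega)]
      rfl
    have hB : is_undulating_alt num
        = decide (a :: b :: t = pvAltList (t.length + 2) a b) := by
      simp only [is_undulating_alt, if_neg hlt, hchars, hrep]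
      rw [PySem.List.slice_to _ (by positivity)]
      have hlen : (((a :: b :: t).length : Int)).toNat = t.length + 2 := by simp; omega
      rw [hlen]
      unfold PySem.List.pyRepeat
      rw [hlen, pv_take_flatten a b (t.length + 2) (t.length + 2) (by omega)]
    rw [hA, hB]
    have := (pv_loop_altern a b ha hb t ht).1
    rw [this]
    simp only [pvAltList]
    simp

-- ===== VERDICT (by name: the statement is the Claim_ definition above) =====
theorem is_undulating_spec : Claim_equal_is_undulating := by
  intro num _
  unfold Spec_is_undulating
  exact is_undulating_spec' num
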